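-- pv_equiv track=rewrite | github.com/Mhshohag2256/CSC113-Python | Mehedi_H_Shohag_Midterm.py | alphabet_order
-- ===== SOURCE A (Python) =====
-- def alphabet_order(string):
--     n = len(string)
--     vowel = set('aeiou')
--     stringSet = set(string)
--     string_vowel = []
--     if stringSet.issuperset(vowel):
--         for i in string:
--             if i in 'aeiou':
--                 string_vowel.append(i)
--         for j in range(1, len(string_vowel)):
--             if (string_vowel[j] < string_vowel[j - 1]):
--                 return False
--         return True
--     else:
--         return False
-- ===== SOURCE B (Python) =====
-- def alphabet_order(string):
--     vowels = [c for c in string if c in 'aeiou']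
--     return set('aeiou') <= set(string) and vowels == sorted(vowels)
-- ===== Notes on version B (the rewrite author's own statement) =====
-- stated objective: simpler
-- what changed: Replaces A's superset guard plus explicit adjacent-index comparison loop with one expression: extract the vowel subsequence by a comprehension and test order by comparing it with its sorted copy.
import Mathlib
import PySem

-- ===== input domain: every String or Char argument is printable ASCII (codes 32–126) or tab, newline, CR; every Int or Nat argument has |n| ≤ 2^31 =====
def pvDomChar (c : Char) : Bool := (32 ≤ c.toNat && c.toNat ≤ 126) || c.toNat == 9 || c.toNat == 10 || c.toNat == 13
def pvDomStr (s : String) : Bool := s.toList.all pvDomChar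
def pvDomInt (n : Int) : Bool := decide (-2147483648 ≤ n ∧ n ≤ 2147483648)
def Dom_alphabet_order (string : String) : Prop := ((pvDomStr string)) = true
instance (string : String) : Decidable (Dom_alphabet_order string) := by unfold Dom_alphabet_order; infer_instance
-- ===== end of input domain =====

-- B checks vowel order by comparing the vowel subsequence with its sorted copy instead of A's adjacent-index loop (objective: simpler).

-- ===== PORT A =====
-- the 'for j in range(1, len(string_vowel))' loop with its early 'return False'
def alphabetLoop (sv : List Char) : List Int → Bool
  | [] => true
  | j :: rest =>
    if PySem.List.pyGetD sv j ' ' < PySem.List.pyGetD sv (j - 1) ' ' then false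
    else alphabetLoop sv rest

def alphabet_order (string : String) : Bool :=
  let vowel : PySem.Set Char := PySem.Set.ofList "aeiou".toList
  let stringSet : PySem.Set Char := PySem.Set.ofList string.toList
  if PySem.Set.issuperset stringSet vowel then
    let string_vowel : List Char :=
      string.toList.foldl (fun acc i => if ("aeiou".toList).contains i then acc ++ [i] else acc) []
    alphabetLoop string_vowel (PySem.List.pyRange 1 (string_vowel.length : Int) 1)
  else false

-- ===== PORT B =====
def alphabet_order_alt (string : String) : Bool :=
  let vowels : List Char := string.toList.filter (fun c => ("aeiou".toList).contains c)
  PySem.Set.issubset (PySem.Set.ofList "aeiou".toList) (PySem.Set.ofList string.toList)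
    && (vowels == PySem.List.sorted vowels (fun x => x) false)

-- ===== PRECONDITION & SPEC =====
def Spec_alphabet_order (string : String) (out : Bool) : Prop := out = alphabet_order_alt string
instance (string : String) (out : Bool) : Decidable (Spec_alphabet_order string out) := by unfold Spec_alphabet_order; infer_instance

-- ===== CLAIM (what is proved, stated in full; the proofs are below) =====
def Claim_equal_alphabet_order : Prop := ∀ (string : String), Dom_alphabet_order string → Spec_alphabet_order string (alphabet_order string)

-- ===== LEMMAS AND PROOFS =====

-- the early-return loop is an 'all' over the index list
theorem alphabetLoop_eq_all (sv : List Char) (js : List Int) :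
    alphabetLoop sv js
      = js.all (fun j => !(PySem.List.pyGetD sv j ' ' < PySem.List.pyGetD sv (j - 1) ' ')) := by
  induction js with
  | nil => rfl
  | cons j rest ih =>
    simp [alphabetLoop, ih]

-- A's adjacent scan equals B's sorted-copy comparison
theorem loop_eq_sorted_cmp (l : List Char) :
    alphabetLoop l (PySem.List.pyRange 1 (l.length : Int) 1)
      = (l == PySem.List.sorted l (fun x => x) false) := by
  rw [Bool.eq_iff_iff]
  rw [alphabetLoop_eq_all]
  simp only [List.all_eq_true, PySem.List.mem_pyRange_one, beq_iff_eq]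
  constructor
  · intro h
    have hp : l.Pairwise (fun a b : Char => a ≤ b) := by
      rw [← List.isChain_iff_pairwise, List.isChain_iff_getElem]
      intro i hi
      have h1 : (1 : Int) ≤ (i : Int) + 1 := by omega
      have h2 : ((i : Int) + 1) < (l.length : Int) := by exact_mod_cast (by omega : i + 1 < l.length)
      have hx := h ((i : Int) + 1) ⟨h1, h2⟩
      simp only [Bool.not_eq_eq_eq_not, Bool.not_true, decide_eq_false_iff_not] at hx
      rw [PySem.List.pyGetD_of_nonneg (i := (i : Int) + 1) l ' ' (by omega),
        PySem.List.pyGetD_of_nonneg (i := (i : Int) + 1 - 1) l ' ' (by omega)] at hx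
      rw [show ((i : Int) + 1).toNat = i + 1 by omega, show ((i : Int) + 1 - 1).toNat = i by omega] at hx
      rw [List.getD_eq_getElem l ' ' (by omega), List.getD_eq_getElem l ' ' (by omega)] at hx
      exact not_lt.mp hx
    exact (PySem.List.sorted_eq_self_of_pairwise l (fun x => x) hp).symm
  · intro h j hj
    have hp : l.Pairwise (fun a b : Char => a ≤ b) := by
      have hs := PySem.List.sorted_pairwise (xs := l) (key := fun x : Char => x)
      rw [← h] at hs
      exact hs
    rw [List.pairwise_iff_getElem] at hp
    simp only [Bool.not_eq_eq_eq_not, Bool.not_true, decide_eq_false_iff_not]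
    rw [PySem.List.pyGetD_of_nonneg (i := j) l ' ' (by omega),
      PySem.List.pyGetD_of_nonneg (i := j - 1) l ' ' (by omega)]
    rw [List.getD_eq_getElem l ' ' (by omega), List.getD_eq_getElem l ' ' (by omega)]
    exact not_lt.mpr (hp (j - 1).toNat j.toNat (by omega) (by omega) (by omega))

theorem issuperset_eq_issubset (s t : PySem.Set Char) :
    PySem.Set.issuperset s t = PySem.Set.issubset t s := by
  rw [Bool.eq_iff_iff, PySem.Set.issuperset_iff, PySem.Set.issubset_iff]

-- ===== VERDICT (by name: the statement is the Claim_ definition above) =====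
theorem alphabet_order_spec : Claim_equal_alphabet_order := by
  intro s _
  unfold Spec_alphabet_order alphabet_order alphabet_order_alt
  simp only [issuperset_eq_issubset, PySem.List.foldl_append_if_eq_filter, List.nil_append,
    loop_eq_sorted_cmp]
  by_cases h : PySem.Set.issubset (PySem.Set.ofList "aeiou".toList) (PySem.Set.ofList s.toList) = true
  · rw [if_pos h, h, Bool.true_and]
  · rw [if_neg h, Bool.not_eq_true] at *
    rw [h, Bool.false_and]
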